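-- pv_equiv track=rewrite | github.com/kawaMK2/util | import_xyzrgb/import_xyzrgb.py | create_faces
-- ===== SOURCE A (Python) =====
-- def create_faces(num_wid, num_heigh):
--     faces = []
--     j = 0
--     for i in range(0, num_heigh * (num_wid - 1)):
--         if j < num_heigh - 1:
--             face = (i, i + 1,  i + num_heigh + 1, i + num_heigh)
--             faces.append(face)
--             j = j + 1
--         else:
--             j = 0
--     return faces
-- ===== SOURCE B (Python) =====
-- def create_faces(num_wid, num_heigh):
--     # rank-to-face closed form: the k-th face (in output order) sits at grid
--     # index i = k + k // (num_heigh - 1); the output is preallocated and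
--     # filled by rank -- no counter, no nested loops, no appends.
--     if num_wid < 2 or num_heigh < 2:
--         return []
--     rows = num_heigh - 1
--     total = (num_wid - 1) * rows
--     faces = [None] * total
--     for k in range(total):
--         i = k + k // rows
--         faces[k] = (i, i + 1, i + num_heigh + 1, i + num_heigh)
--     return faces
-- ===== Notes on version B (the rewrite author's own statement) =====
-- stated objective: simpler
-- what changed: Replaces A's flat scan over every grid cell carrying a skip/reset counter j by a degenerate-grid guard plus a preallocated output filled by face rank, where the k-th face's grid index is computed in closed form as i = k + k // (num_heigh - 1), so there is no stateful counter and no skipped iterations.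
import Mathlib
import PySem

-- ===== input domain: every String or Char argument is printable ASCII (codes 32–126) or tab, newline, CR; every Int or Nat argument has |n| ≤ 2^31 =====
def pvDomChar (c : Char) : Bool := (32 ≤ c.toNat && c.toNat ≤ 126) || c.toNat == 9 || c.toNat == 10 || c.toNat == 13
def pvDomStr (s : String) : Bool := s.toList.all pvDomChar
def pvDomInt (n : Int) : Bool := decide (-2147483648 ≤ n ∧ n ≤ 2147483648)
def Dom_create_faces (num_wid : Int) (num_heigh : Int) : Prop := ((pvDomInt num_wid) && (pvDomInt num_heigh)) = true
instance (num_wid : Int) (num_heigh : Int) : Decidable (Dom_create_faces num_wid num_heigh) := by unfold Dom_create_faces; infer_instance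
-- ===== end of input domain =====

-- B replaces A's flat scan over all grid cells with its skip/reset counter by a
-- rank-to-face closed form (i = k + k // (num_heigh - 1)) over the face count (simpler);
-- return values proved equal on all inputs.

-- ===== PORT A =====
-- literal port of A: one flat loop over range(0, num_heigh*(num_wid-1)) carrying (faces, j)
def create_faces (num_wid : Int) (num_heigh : Int) : List (Int × Int × Int × Int) :=
  let st := (PySem.List.pyRange 0 (num_heigh * (num_wid - 1)) 1).foldl
    (fun (st : List (Int × Int × Int × Int) × Int) i =>
      if st.2 < num_heigh - 1 then
        (st.1 ++ [(i, i + 1, i + num_heigh + 1, i + num_heigh)], st.2 + 1)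
      else
        (st.1, 0))
    ([], 0)
  st.1

-- ===== PORT B =====
-- literal port of B: guard for degenerate grids, then the preallocate-and-fill
-- loop (faces[k] = face of rank k, for k in range(total)) ported as the
-- rank-indexed map over the same range; the k-th face's grid index is the
-- closed form i = k + k // rows
def create_faces_alt (num_wid : Int) (num_heigh : Int) : List (Int × Int × Int × Int) :=
  if num_wid < 2 ∨ num_heigh < 2 then []
  else
    let rows := num_heigh - 1
    let total := (num_wid - 1) * rows
    (PySem.List.pyRange 0 total 1).map (fun k =>
      let i := k + PySem.Int.floordiv k rows
      (i, i + 1, i + num_heigh + 1, i + num_heigh))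

-- ===== PRECONDITION & SPEC =====
def Spec_create_faces (num_wid : Int) (num_heigh : Int) (out : List (Int × Int × Int × Int)) : Prop := out = create_faces_alt num_wid num_heigh
instance (num_wid : Int) (num_heigh : Int) (out : List (Int × Int × Int × Int)) : Decidable (Spec_create_faces num_wid num_heigh out) := by unfold Spec_create_faces; infer_instance

-- ===== CLAIM (what is proved, stated in full; the proofs are below) =====
def Claim_equal_create_faces : Prop := ∀ (num_wid : Int) (num_heigh : Int), Dom_create_faces num_wid num_heigh → Spec_create_faces num_wid num_heigh (create_faces num_wid num_heigh)

-- ===== LEMMAS AND PROOFS =====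

-- A's loop step, named for the lemmas below
def pvStepA (H : Int) (st : List (Int × Int × Int × Int) × Int) (i : Int) :
    List (Int × Int × Int × Int) × Int :=
  if st.2 < H - 1 then (st.1 ++ [(i, i + 1, i + H + 1, i + H)], st.2 + 1)
  else (st.1, 0)

def pvFace (H i : Int) : Int × Int × Int × Int := (i, i + 1, i + H + 1, i + H)

-- when H ≤ 1 the condition 0 < H-1 never fires and the state (fs,0) is fixed
theorem pvA_idle (H : Int) (hH : H ≤ 1) (l : List Int) (fs : List (Int × Int × Int × Int)) :
    l.foldl (pvStepA H) (fs, 0) = (fs, 0) := by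
  induction l with
  | nil => rfl
  | cons a t ih =>
      simp only [List.foldl_cons, pvStepA]
      rw [if_neg (by omega : ¬ ((0:Int) < H - 1))]
      exact ih

-- a run of m appending iterations inside one block of A's loop
theorem pvA_run (H : Int) (_hH : 2 ≤ H) (m : Nat) (hm : (m : Int) ≤ H - 1) :
    ∀ (s : Int) (fs : List (Int × Int × Int × Int)),
      (PySem.List.pyRange s (s + m) 1).foldl (pvStepA H) (fs, H - 1 - m) =
        (fs ++ (PySem.List.pyRange s (s + m) 1).map (pvFace H), H - 1) := by
  induction m with
  | zero =>
      intro s fs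
      simp [PySem.List.pyRange_one_eq_nil (le_refl s)]
  | succ k ih =>
      intro s fs
      rw [PySem.List.pyRange_one_cons (by push_cast; omega : s < s + (k + 1 : Nat))]
      simp only [List.foldl_cons, List.map_cons, pvStepA]
      rw [if_pos (by push_cast at hm ⊢; omega : H - 1 - ((k + 1 : Nat) : Int) < H - 1)]
      have he : s + ((k + 1 : Nat) : Int) = (s + 1) + (k : Nat) := by push_cast; ring
      have hj : H - 1 - ((k + 1 : Nat) : Int) + 1 = H - 1 - (k : Nat) := by push_cast; ring
      rw [he, hj]
      rw [ih (by push_cast at hm ⊢; omega) (s + 1) (fs ++ [(s, s + 1, s + H + 1, s + H)])]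
      simp [pvFace]

-- one full block of H iterations: H-1 appends then one skip that resets j to 0
theorem pvA_block (H : Int) (hH : 2 ≤ H) (s : Int) (fs : List (Int × Int × Int × Int)) :
    (PySem.List.pyRange s (s + H) 1).foldl (pvStepA H) (fs, 0) =
      (fs ++ (PySem.List.pyRange s (s + (H - 1)) 1).map (pvFace H), 0) := by
  have hsplit := PySem.List.pyRange_one_append s (s + (H - 1)) (s + H)
    (by omega) (by omega)
  rw [hsplit, List.foldl_append]
  have hcast : ((H - 1).toNat : Int) = H - 1 := by omega
  have := pvA_run H hH (H - 1).toNat (by omega) s fs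
  rw [hcast] at this
  rw [show H - 1 - (H - 1) = (0:Int) from by ring] at this
  rw [this]
  have hone : PySem.List.pyRange (s + (H - 1)) (s + H) 1 = [s + (H - 1)] := by
    have : s + H = (s + (H - 1)) + 1 := by ring
    rw [this]
    exact PySem.List.pyRange_one_singleton _
  rw [hone]
  simp only [List.foldl_cons, List.foldl_nil, pvStepA]
  rw [if_neg (by omega : ¬ (H - 1 < H - 1))]

-- A over n blocks of H equals the per-column flatMap normal form
theorem pvA_blocks (H : Int) (hH : 2 ≤ H) (n : Nat) :
    ∀ fs : List (Int × Int × Int × Int),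
      (PySem.List.pyRange 0 ((n : Int) * H) 1).foldl (pvStepA H) (fs, 0) =
        (fs ++ (PySem.List.pyRange 0 (n : Int) 1).flatMap (fun w =>
          (PySem.List.pyRange (w * H) (w * H + (H - 1)) 1).map (pvFace H)), 0) := by
  induction n with
  | zero => intro fs; simp
  | succ k ih =>
      intro fs
      have h1 : ((k + 1 : Nat) : Int) * H = (k : Nat) * H + H := by push_cast; ring
      have h2 : PySem.List.pyRange 0 (((k + 1 : Nat) : Int) * H) 1 =
          PySem.List.pyRange 0 ((k : Nat) * H) 1 ++
            PySem.List.pyRange ((k : Nat) * H) ((k : Nat) * H + H) 1 := by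
        rw [h1]
        exact PySem.List.pyRange_one_append 0 ((k : Nat) * H) ((k : Nat) * H + H)
          (by positivity) (by omega)
      rw [h2, List.foldl_append, ih fs]
      have h3 : PySem.List.pyRange 0 ((k + 1 : Nat) : Int) 1 =
          PySem.List.pyRange 0 ((k : Nat) : Int) 1 ++ [((k : Nat) : Int)] := by
        have he : ((k + 1 : Nat) : Int) = ((k : Nat) : Int) + 1 := by push_cast; ring
        rw [he]
        exact PySem.List.pyRange_one_succ_right (by positivity)
      rw [h3, List.flatMap_append]
      rw [pvA_block H hH ((k : Nat) * H) _]
      simp [List.append_assoc]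

-- one column of B: on k ∈ [w(H-1), (w+1)(H-1)) the floordiv is exactly w,
-- so the closed form i = k + w sweeps the column's grid indices
theorem pvB_block (H : Int) (hH : 2 ≤ H) (w : Int) :
    (PySem.List.pyRange (w * (H - 1)) ((w + 1) * (H - 1)) 1).map
        (fun k => pvFace H (k + PySem.Int.floordiv k (H - 1))) =
      (PySem.List.pyRange (w * H) (w * H + (H - 1)) 1).map (pvFace H) := by
  have hlen1 : (w + 1) * (H - 1) - w * (H - 1) = H - 1 := by ring
  have hlen2 : w * H + (H - 1) - w * H = H - 1 := by ring
  apply List.ext_getElem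
  · simp [PySem.List.length_pyRange_one, hlen1, hlen2]
  · intro j h1 h2
    simp only [List.getElem_map, PySem.List.getElem_pyRange_one]
    have hj : (j : Int) < H - 1 := by
      simp [PySem.List.length_pyRange_one, hlen1] at h1
      omega
    have hd : PySem.Int.floordiv (w * (H - 1) + j) (H - 1) = w := by
      rw [PySem.Int.floordiv_eq_iff_of_pos (by omega)]
      constructor
      · omega
      · nlinarith
    rw [hd]
    congr 1
    ring

-- B's flat map over n(H-1) ranks equals the per-column flatMap normal form
theorem pvB_blocks (H : Int) (hH : 2 ≤ H) (n : Nat) :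
    (PySem.List.pyRange 0 ((n : Int) * (H - 1)) 1).map
        (fun k => pvFace H (k + PySem.Int.floordiv k (H - 1))) =
      (PySem.List.pyRange 0 (n : Int) 1).flatMap (fun w =>
        (PySem.List.pyRange (w * H) (w * H + (H - 1)) 1).map (pvFace H)) := by
  induction n with
  | zero => simp
  | succ k ih =>
      have h2 : PySem.List.pyRange 0 (((k + 1 : Nat) : Int) * (H - 1)) 1 =
          PySem.List.pyRange 0 ((k : Nat) * (H - 1)) 1 ++
            PySem.List.pyRange ((k : Nat) * (H - 1)) (((k : Nat) + 1) * (H - 1)) 1 := by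
        have he : ((k + 1 : Nat) : Int) * (H - 1) = ((k : Nat) + 1) * (H - 1) := by
          push_cast; ring
        rw [he]
        exact PySem.List.pyRange_one_append _ _ _ (mul_nonneg (Int.natCast_nonneg k) (by omega)) (by nlinarith [Int.natCast_nonneg k])
      have h3 : PySem.List.pyRange 0 ((k + 1 : Nat) : Int) 1 =
          PySem.List.pyRange 0 ((k : Nat) : Int) 1 ++ [((k : Nat) : Int)] := by
        have he : ((k + 1 : Nat) : Int) = ((k : Nat) : Int) + 1 := by push_cast; ring
        rw [he]
        exact PySem.List.pyRange_one_succ_right (by positivity)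
      rw [h2, List.map_append, ih, h3, List.flatMap_append]
      congr 1
      simp only [List.flatMap_cons, List.flatMap_nil, List.append_nil]
      exact pvB_block H hH (k : Nat)

-- definitional bridges between the ports and the named step functions
theorem pvA_eq (W H : Int) :
    create_faces W H =
      ((PySem.List.pyRange 0 (H * (W - 1)) 1).foldl (pvStepA H) ([], 0)).1 := rfl

theorem pvB_eq (W H : Int) :
    create_faces_alt W H =
      if W < 2 ∨ H < 2 then []
      else
        (PySem.List.pyRange 0 ((W - 1) * (H - 1)) 1).map
          (fun k => pvFace H (k + PySem.Int.floordiv k (H - 1))) := rfl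

-- ===== VERDICT (by name: the statement is the Claim_ definition above) =====
theorem create_faces_spec : Claim_equal_create_faces := by
  intro W H _
  unfold Spec_create_faces
  rw [pvA_eq, pvB_eq]
  by_cases hH : H ≤ 1
  · rw [pvA_idle H hH _ [], if_pos (Or.inr (by omega))]
  · by_cases hW : W ≤ 1
    · rw [if_pos (Or.inl (by omega))]
      rw [PySem.List.pyRange_one_eq_nil (by nlinarith : H * (W - 1) ≤ 0)]
      rfl
    · rw [if_neg (by omega)]
      have hn : (((W - 1).toNat : Nat) : Int) = W - 1 := by omega
      have keyA := pvA_blocks H (by omega) (W - 1).toNat []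
      have keyB := pvB_blocks H (by omega) (W - 1).toNat
      rw [hn] at keyA keyB
      rw [show H * (W - 1) = (W - 1) * H from by ring, keyA]
      simp only [List.nil_append]
      exact keyB.symm
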